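-- pv_equiv track=rewrite | github.com/oacastillol/proyecto-criptografia | src/shared/keyGenerator.py | keySeed
-- ===== SOURCE A (Python) =====
-- def keySeed(key):
-- 	orderKey = sorted(key)
-- 	swapKey = []
--
-- 	for k in key:
-- 		ind = orderKey.index(k)
-- 		swapKey.append(ind)
-- 		orderKey[ind] = None
--
-- 	return swapKey
-- ===== SOURCE B (Python) =====
-- def keySeed(key):
-- 	# One pass with the closed form: slot of k = (# chars in key smaller than k)
-- 	# + (# earlier occurrences of k); the smaller-count is computed once per distinct char.
-- 	lt = {}    # char -> number of characters in key smaller than it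
-- 	seen = {}  # char -> occurrences of it already emitted
-- 	out = []
-- 	for k in key:
-- 		if k not in lt:
-- 			lt[k] = sum(c < k for c in key)
-- 		s = seen.get(k, 0)
-- 		out.append(lt[k] + s)
-- 		seen[k] = s + 1
-- 	return out
-- ===== Notes on version B (the rewrite author's own statement) =====
-- stated objective: faster
-- what changed: A sorts the key and, for every character, rescans the sorted copy with .index and blanks the found slot with None; B makes one pass computing each slot by the closed form (# characters smaller than k) + (# earlier occurrences of k), memoizing the smaller-count per distinct character in a dict, so the per-character scan of a shrinking list disappears.
import Mathlib
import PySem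

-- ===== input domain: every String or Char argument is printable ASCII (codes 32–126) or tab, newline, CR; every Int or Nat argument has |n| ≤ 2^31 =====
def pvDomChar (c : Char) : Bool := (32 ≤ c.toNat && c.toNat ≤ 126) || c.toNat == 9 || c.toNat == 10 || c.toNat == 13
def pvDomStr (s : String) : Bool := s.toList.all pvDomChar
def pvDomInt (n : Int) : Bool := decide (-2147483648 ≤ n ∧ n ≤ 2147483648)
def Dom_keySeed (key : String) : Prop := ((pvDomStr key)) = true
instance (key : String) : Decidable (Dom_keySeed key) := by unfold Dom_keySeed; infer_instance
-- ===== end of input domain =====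

-- B replaces A's sort + repeated .index scans over a None-blanked copy by one pass computing
-- each slot via the closed form (# smaller chars + # earlier equal chars), memoized per distinct
-- char; objective: faster (measured).

-- ===== PORT A =====
-- loop body: ind = orderKey.index(k); swapKey.append(ind); orderKey[ind] = None
-- (the `none` branch is Python's ValueError from .index; it is unreachable, k always occurs)
def keySeedStep (st : List (Option Char) × List Int) (k : Char) :
    List (Option Char) × List Int :=
  match PySem.List.index? st.1 (some k) with
  | some ind => (st.1.set ind none, st.2 ++ [(ind : Int)])
  | none => st

def keySeed (key : String) : List Int :=
  let orderKey := (PySem.List.sorted key.toList (fun c => c) false).map some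
  (key.toList.foldl keySeedStep (orderKey, [])).2

-- ===== PORT B =====
-- loop body: if k not in lt: lt[k] = sum(c < k for c in key);
--            s = seen.get(k, 0); out.append(lt[k] + s); seen[k] = s + 1
-- (the `none` branch is Python's KeyError on lt[k]; it is unreachable, k was just ensured present)
def keySeedAltStep (cs : List Char)
    (st : PySem.Dict Char Int × PySem.Dict Char Int × List Int) (k : Char) :
    PySem.Dict Char Int × PySem.Dict Char Int × List Int :=
  let lt := if st.1.contains k then st.1
            else st.1.insert k ((cs.countP (fun c => decide (c < k)) : Int))
  let s := st.2.1.getD k 0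
  match lt.get? k with
  | some v => (lt, st.2.1.insert k (s + 1), st.2.2 ++ [v + s])
  | none => (lt, st.2.1.insert k (s + 1), st.2.2)

def keySeed_alt (key : String) : List Int :=
  (key.toList.foldl (keySeedAltStep key.toList)
    (PySem.Dict.empty, PySem.Dict.empty, [])).2.2

-- ===== PRECONDITION & SPEC =====
def Spec_keySeed (key : String) (out : List Int) : Prop := out = keySeed_alt key
instance (key : String) (out : List Int) : Decidable (Spec_keySeed key out) := by unfold Spec_keySeed; infer_instance

-- ===== CLAIM (what is proved, stated in full; the proofs are below) =====
def Claim_equal_keySeed : Prop := ∀ (key : String), Dom_keySeed key → Spec_keySeed key (keySeed key)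

-- ===== LEMMAS AND PROOFS =====

-- A's orderKey with Nones, as a function of the processed prefix p: slot j of s is blanked
-- iff the rank of j among equal chars is ≤ the number of occurrences already processed.
def pvMask (pref : List Char) (s : List Char) (p : List Char) : List (Option Char) :=
  match s with
  | [] => []
  | c :: t => (if pref.count c + 1 ≤ p.count c then none else some c) :: pvMask (pref ++ [c]) t p

-- the common value of both programs, as a recursion over the key with processed prefix p
def pvGo (cs : List Char) : List Char → List Char → List Int
  | [], _ => []
  | k :: r, p =>
      ((cs.countP (fun c => decide (c < k)) : Int) + (p.count k : Int)) :: pvGo cs r (p ++ [k])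

theorem pvMask_nil (pref s : List Char) : pvMask pref s [] = s.map some := by
  induction s generalizing pref with
  | nil => rfl
  | cons c t ih => simp [pvMask, ih]

theorem pvMask_length (pref s p : List Char) : (pvMask pref s p).length = s.length := by
  induction s generalizing pref with
  | nil => rfl
  | cons c t ih => simp [pvMask, ih]

theorem pvMask_append (pref X Y p : List Char) :
    pvMask pref (X ++ Y) p = pvMask pref X p ++ pvMask (pref ++ X) Y p := by
  induction X generalizing pref with
  | nil => simp [pvMask]
  | cons c t ih => simp [pvMask, ih, List.append_assoc]

theorem mem_pvMask (pref s p : List Char) (x : Option Char) (hx : x ∈ pvMask pref s p) :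
    x = none ∨ ∃ c ∈ s, x = some c := by
  induction s generalizing pref with
  | nil => simp [pvMask] at hx
  | cons c t ih =>
    simp only [pvMask, List.mem_cons] at hx
    rcases hx with h | h
    · split at h
      · exact Or.inl h
      · exact Or.inr ⟨c, by simp, h⟩
    · rcases ih (pref ++ [c]) h with h' | ⟨d, hd, hx⟩
      · exact Or.inl h'
      · exact Or.inr ⟨d, by simp [hd], hx⟩

theorem pvMask_congr (pref s p q : List Char) (h : ∀ c ∈ s, p.count c = q.count c) :
    pvMask pref s p = pvMask pref s q := by
  induction s generalizing pref with
  | nil => rfl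
  | cons c t ih =>
    simp only [pvMask, h c (by simp)]
    rw [ih (pref ++ [c]) (fun d hd => h d (by simp [hd]))]

theorem pvMask_replicate (k : Char) (p : List Char) (n : Nat) :
    ∀ pref : List Char, pvMask pref (List.replicate n k) p =
      List.replicate (min n (p.count k - pref.count k)) none ++
      List.replicate (n - (p.count k - pref.count k)) (some k) := by
  induction n with
  | zero => intro pref; simp [pvMask]
  | succ m ih =>
    intro pref
    rw [List.replicate_succ]
    simp only [pvMask]
    by_cases hb : pref.count k + 1 ≤ p.count k
    · have h1 : p.count k - (pref ++ [k]).count k = p.count k - pref.count k - 1 := by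
        simp [List.count_append]; omega
      rw [if_pos hb, ih (pref ++ [k]), h1]
      have h2 : min (m + 1) (p.count k - pref.count k) =
          min m (p.count k - pref.count k - 1) + 1 := by omega
      have h3 : m + 1 - (p.count k - pref.count k) = m - (p.count k - pref.count k - 1) := by
        omega
      rw [h2, h3, List.replicate_succ]
      simp
    · have h0 : p.count k - pref.count k = 0 := by omega
      have h0' : p.count k - (pref ++ [k]).count k = 0 := by
        simp [List.count_append]; omega
      rw [if_neg hb, ih (pref ++ [k]), h0, h0']
      simp [List.replicate_succ]

-- index? skips a prefix that does not contain the sought value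
theorem index?_not_mem_append {α : Type} [BEq α] [LawfulBEq α] (l t : List α) (v : α)
    (h : v ∉ l) : PySem.List.index? (l ++ t) v = (PySem.List.index? t v).map (· + l.length) := by
  induction l with
  | nil => simp
  | cons a l ih =>
    have ha : a ≠ v := by intro he; exact h (by simp [he])
    rw [List.cons_append, PySem.List.index?_cons_of_ne _ ha, ih (fun hm => h (by simp [hm]))]
    cases PySem.List.index? t v <;> simp <;> omega

theorem index?_replicate_none_cons (m : Nat) (k : Char) (rest : List (Option Char)) :
    PySem.List.index? (List.replicate m (none : Option Char) ++ some k :: rest) (some k) =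
      some m := by
  induction m with
  | zero => rw [List.replicate_zero, List.nil_append, PySem.List.index?_cons_self]
  | succ i ih =>
    rw [List.replicate_succ, List.cons_append,
      PySem.List.index?_cons_of_ne _ (show (none : Option Char) ≠ some k by simp), ih]
    simp

-- a sorted list splits as (chars < k) ++ (copies of k) ++ (chars > k)
theorem sorted_decomp (k : Char) (s : List Char) (hs : s.Pairwise (· ≤ ·)) :
    s = s.filter (fun c => decide (c < k)) ++ List.replicate (s.count k) k ++
        s.filter (fun c => decide (k < c)) := by
  have key : ∀ u : List Char, u.Pairwise (· ≤ ·) →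
      u = u.filter (fun c => decide (c < k)) ++ u.filter (fun c => c == k) ++
          u.filter (fun c => decide (k < c)) := by
    intro u hu
    induction u with
    | nil => simp
    | cons c t ih =>
      have hp : ∀ x ∈ t, c ≤ x := (List.pairwise_cons.mp hu).1
      have ih' := ih (List.pairwise_cons.mp hu).2
      rcases lt_trichotomy c k with h | h | h
      · have e1 : decide (c < k) = true := decide_eq_true h
        have e2 : (c == k) = false := by simp [ne_of_lt h]
        have e3 : decide (k < c) = false := decide_eq_false (not_lt.mpr (le_of_lt h))
        simp only [List.filter_cons, e1, e2, e3, if_true, if_false, Bool.false_eq_true]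
        rw [List.cons_append, List.cons_append]
        exact congrArg (c :: ·) ih'
      · subst h
        have h1 : t.filter (fun x => decide (x < c)) = [] :=
          List.filter_eq_nil_iff.mpr (fun x hx => by simp [not_lt.mpr (hp x hx)])
        have e1 : decide (c < c) = false := decide_eq_false (lt_irrefl c)
        rw [h1] at ih'
        simp only [List.filter_cons, e1, BEq.rfl, if_true, if_false, h1,
          Bool.false_eq_true, List.nil_append] at ih' ⊢
        rw [List.cons_append]
        exact congrArg (c :: ·) ih'
      · have h1 : t.filter (fun x => decide (x < k)) = [] :=
          List.filter_eq_nil_iff.mpr (fun x hx => by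
            simp [not_lt.mpr (le_of_lt (lt_of_lt_of_le h (hp x hx)))])
        have h2 : t.filter (fun x => x == k) = [] :=
          List.filter_eq_nil_iff.mpr (fun x hx => by
            simp; exact ne_of_gt (lt_of_lt_of_le h (hp x hx)))
        have e1 : decide (c < k) = false := decide_eq_false (not_lt.mpr (le_of_lt h))
        have e2 : (c == k) = false := by simp [ne_of_gt h]
        have e3 : decide (k < c) = true := decide_eq_true h
        rw [h1, h2] at ih'
        simp only [List.filter_cons, e1, e2, e3, if_true, if_false, h1, h2,
          Bool.false_eq_true, List.nil_append] at ih' ⊢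
        exact congrArg (c :: ·) ih'
  have := key s hs
  rw [List.filter_beq] at this
  exact this

-- first index of k in the masked sorted list = (#chars < k) + (#already processed ks)
theorem index_pvMask (s p : List Char) (k : Char) (hs : s.Pairwise (· ≤ ·))
    (hm : p.count k < s.count k) :
    PySem.List.index? (pvMask [] s p) (some k) =
      some (s.countP (fun c => decide (c < k)) + p.count k) := by
  set L := s.filter (fun c => decide (c < k)) with hL
  set R := s.filter (fun c => decide (k < c)) with hR
  have hd := sorted_decomp k s hs
  set m := p.count k with hmdef
  have hkL : k ∉ L := fun hm =>
    absurd (by simpa using List.of_mem_filter hm) (lt_irrefl k)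
  have hLk : (0:Nat) = L.count k := (List.count_eq_zero.mpr hkL).symm
  conv_lhs => rw [hd]
  rw [pvMask_append, pvMask_append]
  simp only [List.nil_append]
  rw [pvMask_replicate k p (s.count k) L, ← hLk]
  have hmin : min (s.count k) (m - 0) = m := by omega
  have hrep : s.count k - (m - 0) = (s.count k - m - 1) + 1 := by omega
  rw [hmin, hrep, List.replicate_succ]
  have hnm : some k ∉ pvMask [] L p := by
    intro hmem
    rcases mem_pvMask [] L p (some k) hmem with h | ⟨c, hc, hx⟩
    · exact absurd h (by simp)
    · have : c < k := by
        rw [hL] at hc; have := List.of_mem_filter hc; simpa using this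
      rw [Option.some_inj.mp hx.symm] at this; exact lt_irrefl _ this
  rw [List.append_assoc, index?_not_mem_append _ _ _ hnm, List.append_assoc,
    List.cons_append, index?_replicate_none_cons, pvMask_length]
  simp only [Option.map_some, hL]
  congr 1
  rw [List.countP_eq_length_filter]
  omega

-- blanking that slot advances the processed prefix by one k
theorem set_pvMask (s p : List Char) (k : Char) (hs : s.Pairwise (· ≤ ·))
    (hm : p.count k < s.count k) :
    (pvMask [] s p).set (s.countP (fun c => decide (c < k)) + p.count k) none =
      pvMask [] s (p ++ [k]) := by
  have hd := sorted_decomp k s hs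
  set L := s.filter (fun c => decide (c < k)) with hL
  set R := s.filter (fun c => decide (k < c)) with hR
  set cnt := s.count k with hcnt
  set m := p.count k with hmdef
  have hkL : k ∉ L := fun hmem =>
    absurd (by simpa using List.of_mem_filter hmem) (lt_irrefl k)
  have hLk : (0:Nat) = L.count k := (List.count_eq_zero.mpr hkL).symm
  have hLlen : (pvMask [] L p).length = s.countP (fun c => decide (c < k)) := by
    rw [pvMask_length, hL, ← List.countP_eq_length_filter]
  have hLcongr : pvMask [] L p = pvMask [] L (p ++ [k]) := by
    apply pvMask_congr
    intro c hc
    have hck : c < k := by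
      have := List.of_mem_filter hc; simpa using this
    simp [List.count_append, ne_of_gt hck]
  have hRcongr : pvMask (L ++ List.replicate cnt k) R p =
      pvMask (L ++ List.replicate cnt k) R (p ++ [k]) := by
    apply pvMask_congr
    intro c hc
    have hck : k < c := by
      have := List.of_mem_filter hc; simpa using this
    simp [List.count_append, ne_of_lt hck]
  have hmask : pvMask [] s p =
      pvMask [] L p ++ ((List.replicate m none ++
        some k :: List.replicate (cnt - m - 1) (some k)) ++
        pvMask (L ++ List.replicate cnt k) R p) := by
    conv_lhs => rw [hd]
    rw [pvMask_append, pvMask_append]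
    simp only [List.nil_append]
    rw [pvMask_replicate k p cnt L, ← hLk]
    have h1 : min cnt (m - 0) = m := by omega
    have h2 : cnt - (m - 0) = (cnt - m - 1) + 1 := by omega
    rw [h1, h2, List.replicate_succ]
    simp [List.append_assoc]
  have hmask' : pvMask [] s (p ++ [k]) =
      pvMask [] L p ++ ((List.replicate (m + 1) none ++
        List.replicate (cnt - m - 1) (some k)) ++
        pvMask (L ++ List.replicate cnt k) R p) := by
    conv_lhs => rw [hd]
    rw [pvMask_append, pvMask_append]
    simp only [List.nil_append]
    rw [pvMask_replicate k (p ++ [k]) cnt L, ← hLk]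
    have hck1 : (p ++ [k]).count k = m + 1 := by
      simp [List.count_append]; omega
    rw [hck1]
    have h1 : min cnt (m + 1 - 0) = m + 1 := by omega
    have h2 : cnt - (m + 1 - 0) = cnt - m - 1 := by omega
    rw [h1, h2, ← hLcongr, ← hRcongr]
    simp [List.append_assoc]
  rw [hmask, hmask']
  rw [List.set_append_right _ _ (by rw [hLlen]; omega), hLlen]
  have hi : s.countP (fun c => decide (c < k)) + m - s.countP (fun c => decide (c < k)) = m := by
    omega
  rw [hi, List.append_assoc, List.set_append_right _ _ (by simp), List.length_replicate,
    Nat.sub_self, List.cons_append, List.set_cons_zero]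
  simp [List.replicate_succ' (n := m), List.append_assoc]

-- A's loop, run from the state reached after processing prefix p
theorem keySeed_loop (cs : List Char) (s : List Char) (hs : s.Pairwise (· ≤ ·))
    (hperm : s.Perm cs) :
    ∀ r p acc, p ++ r = cs →
      List.foldl keySeedStep (pvMask [] s p, acc) r =
        (pvMask [] s (p ++ r), acc ++ pvGo cs r p) := by
  intro r
  induction r with
  | nil => intro p acc _; simp [pvGo]
  | cons k r' ih =>
    intro p acc hpr
    have hm : p.count k < s.count k := by
      rw [hperm.count_eq, ← hpr]
      simp [List.count_append]
    have hstep : keySeedStep (pvMask [] s p, acc) k =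
        (pvMask [] s (p ++ [k]),
          acc ++ [((s.countP (fun c => decide (c < k)) + p.count k : Nat) : Int)]) := by
      unfold keySeedStep
      rw [index_pvMask s p k hs hm]
      simp only
      rw [set_pvMask s p k hs hm]
    have hx : ((s.countP (fun c => decide (c < k)) + p.count k : Nat) : Int) =
        (cs.countP (fun c => decide (c < k)) : Int) + (p.count k : Int) := by
      rw [hperm.countP_eq]; push_cast; ring
    rw [List.foldl_cons, hstep, ih (p ++ [k]) _ (by simp [hpr]), hx]
    simp [pvGo, List.append_assoc]

theorem keySeed_eq_pvGo (key : String) :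
    keySeed key = pvGo key.toList key.toList [] := by
  have h := keySeed_loop key.toList (PySem.List.sorted key.toList (fun c => c) false)
    (PySem.List.sorted_pairwise key.toList (fun c => c))
    (PySem.List.sorted_perm key.toList (fun c => c) false)
    key.toList [] [] (by simp)
  rw [pvMask_nil] at h
  show (List.foldl keySeedStep
      ((PySem.List.sorted key.toList (fun c => c) false).map some, []) key.toList).2 =
    pvGo key.toList key.toList []
  rw [h]
  simp

theorem keySeed_alt_loop (cs : List Char) :
    ∀ (r p : List Char) (lt seen : PySem.Dict Char Int) (acc : List Int),
      (∀ k : Char, lt.get? k =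
        if k ∈ p then some ((cs.countP (fun c => decide (c < k)) : Int)) else none) →
      (∀ k : Char, seen.getD k 0 = (p.count k : Int)) →
      (List.foldl (keySeedAltStep cs) (lt, seen, acc) r).2.2 = acc ++ pvGo cs r p := by
  intro r
  induction r with
  | nil => intro p lt seen acc _ _; simp [pvGo]
  | cons k r' ih =>
    intro p lt seen acc hlt hseen
    by_cases hk : k ∈ p
    · have hget : lt.get? k = some ((cs.countP (fun c => decide (c < k)) : Int)) := by
        rw [hlt k, if_pos hk]
      have hcon : lt.contains k = true := by
        rcases h : lt.contains k with _ | _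
        · rw [(PySem.Dict.get?_eq_none_iff_contains lt k).mpr h] at hget; cases hget
        · rfl
      have hstep : keySeedAltStep cs (lt, seen, acc) k =
          (lt, seen.insert k (seen.getD k 0 + 1),
            acc ++ [(cs.countP (fun c => decide (c < k)) : Int) + seen.getD k 0]) := by
        unfold keySeedAltStep
        simp only [hcon, if_true, hget]
      rw [List.foldl_cons, hstep,
        ih (p ++ [k]) lt _ _
          (fun k' => by
            rw [hlt k']
            by_cases h : k' = k
            · subst h; simp [hk]
            · simp [List.mem_append, h])
          (fun k' => by
            rw [PySem.Dict.getD_insert]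
            by_cases h : k' = k
            · subst h; rw [if_pos rfl, hseen k']
              simp [List.count_append]
            · rw [if_neg h, hseen k']
              simp [List.count_append, Ne.symm h])]
      simp only [pvGo, hseen k, List.append_assoc, List.singleton_append]
    · have hcon : lt.contains k = false :=
        (PySem.Dict.get?_eq_none_iff_contains lt k).mp (by rw [hlt k, if_neg hk])
      have hstep : keySeedAltStep cs (lt, seen, acc) k =
          (lt.insert k ((cs.countP (fun c => decide (c < k)) : Int)),
            seen.insert k (seen.getD k 0 + 1),
            acc ++ [(cs.countP (fun c => decide (c < k)) : Int) + seen.getD k 0]) := by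
        unfold keySeedAltStep
        simp only [hcon, Bool.false_eq_true, if_false, PySem.Dict.get?_insert_self]
      rw [List.foldl_cons, hstep,
        ih (p ++ [k]) _ _ _
          (fun k' => by
            rw [PySem.Dict.get?_insert]
            by_cases h : k' = k
            · subst h; simp
            · rw [if_neg h, hlt k']
              simp [List.mem_append, h])
          (fun k' => by
            rw [PySem.Dict.getD_insert]
            by_cases h : k' = k
            · subst h; rw [if_pos rfl, hseen k']
              simp [List.count_append]
            · rw [if_neg h, hseen k']
              simp [List.count_append, Ne.symm h])]
      simp only [pvGo, hseen k, List.append_assoc, List.singleton_append]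

theorem keySeed_alt_eq_pvGo (key : String) :
    keySeed_alt key = pvGo key.toList key.toList [] := by
  unfold keySeed_alt
  rw [keySeed_alt_loop key.toList key.toList [] PySem.Dict.empty PySem.Dict.empty []
    (fun k => by simp [PySem.Dict.get?_empty])
    (fun k => by simp [PySem.Dict.getD_empty])]
  simp

-- ===== VERDICT (by name: the statement is the Claim_ definition above) =====
theorem keySeed_spec : Claim_equal_keySeed := by
  intro key _
  unfold Spec_keySeed
  rw [keySeed_eq_pvGo, keySeed_alt_eq_pvGo]
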